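-- pv_equiv track=rewrite | github.com/Valiev/contests | adventofcode.com/2024/day04.py | lines_diag_up
-- ===== SOURCE A (Python) =====
-- def lines_diag_up(lines):
--     X_MAX = len(lines[0])
--     Y_MAX = len(lines)
--     for d in range(X_MAX + Y_MAX):
--         x = 0
--         y = d
--         while y >= Y_MAX:
--             y -= 1
--             x += 1
--         if x >= X_MAX:
--             break
--         diag = []
--         while x < X_MAX and y >= 0:
--             diag.append(lines[y][x])
--             x += 1
--             y -= 1
--         yield ''.join(diag)
-- ===== SOURCE B (Python) =====
-- def lines_diag_up(lines):
--     X_MAX = len(lines[0])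
--     Y_MAX = len(lines)
--     if X_MAX == 0:
--         return
--     buckets = [[] for _ in range(X_MAX + Y_MAX - 1)]
--     for y in range(Y_MAX - 1, -1, -1):
--         row = lines[y]
--         for x in range(X_MAX):
--             buckets[x + y].append(row[x])
--     for b in buckets:
--         yield ''.join(b)
-- ===== Notes on version B (the rewrite author's own statement) =====
-- stated objective: alternative
-- what changed: B builds all anti-diagonals in one pass over the rows into x+y-indexed buckets (rows scanned bottom-up so each bucket is ordered like A), instead of A's per-diagonal walk that recomputes each diagonal's start cell with a while loop.
import Mathlib
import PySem

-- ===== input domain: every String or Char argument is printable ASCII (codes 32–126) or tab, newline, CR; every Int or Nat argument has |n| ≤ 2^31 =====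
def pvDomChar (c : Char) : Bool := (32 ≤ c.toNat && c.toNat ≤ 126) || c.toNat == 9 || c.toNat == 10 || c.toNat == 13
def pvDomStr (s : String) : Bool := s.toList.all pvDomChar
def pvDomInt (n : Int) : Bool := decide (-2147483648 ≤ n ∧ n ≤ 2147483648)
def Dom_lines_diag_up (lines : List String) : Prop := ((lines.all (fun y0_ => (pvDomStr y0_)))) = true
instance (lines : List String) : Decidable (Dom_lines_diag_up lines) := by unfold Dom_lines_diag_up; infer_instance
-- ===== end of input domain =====

-- B replaces A's per-diagonal start-cell walk by a single bucket-building pass over the rows (alternative decomposition; return values proved equal).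

-- ===== PORT A =====
-- while y >= Y_MAX: y -= 1; x += 1
def pvSkipA (Y x y : Int) : Int × Int :=
  if _h : Y ≤ y then pvSkipA Y (x + 1) (y - 1) else (x, y)
termination_by (y - Y + 1).toNat
decreasing_by omega

-- while x < X_MAX and y >= 0: diag.append(lines[y][x]); x += 1; y -= 1
def pvCollectA (g : List (List Char)) (X x y : Int) : List Char :=
  if _h : x < X ∧ 0 ≤ y then
    PySem.List.pyGetD (PySem.List.pyGetD g y []) x ' ' :: pvCollectA g X (x + 1) (y - 1)
  else []
termination_by (X - x).toNat
decreasing_by omega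

-- for d in range(X_MAX + Y_MAX): … with the 'break'
def pvOuterA (g : List (List Char)) (X Y : Int) : List Int → List String
  | [] => []
  | d :: ds =>
    let p := pvSkipA Y 0 d
    if X ≤ p.1 then []
    else String.ofList (pvCollectA g X p.1 p.2) :: pvOuterA g X Y ds

def lines_diag_up (lines : List String) : List String :=
  let g := lines.map String.toList
  let X : Int := (PySem.List.pyGetD g 0 []).length
  let Y : Int := lines.length
  pvOuterA g X Y (PySem.List.pyRange 0 (X + Y) 1)

-- ===== PORT B =====
-- buckets[i].append(c)
def pvAppendAt (bs : List (List Char)) (i : Int) (c : Char) : List (List Char) :=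
  PySem.List.pySetD bs i (PySem.List.pyGetD bs i [] ++ [c])

def lines_diag_up_alt (lines : List String) : List String :=
  let g := lines.map String.toList
  let X : Int := (PySem.List.pyGetD g 0 []).length
  let Y : Int := lines.length
  if X = 0 then []
  else
    let init : List (List Char) := List.replicate (X + Y - 1).toNat []
    let buckets := (PySem.List.pyRange (Y - 1) (-1) (-1)).foldl
      (fun bs y =>
        let row := PySem.List.pyGetD g y []
        (PySem.List.pyRange 0 X 1).foldl
          (fun bs2 x => pvAppendAt bs2 (x + y) (PySem.List.pyGetD row x ' ')) bs) init
    buckets.map String.ofList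

-- ===== PRECONDITION & SPEC =====
-- Pre_ excludes exactly the inputs where the Python A raises IndexError: the empty list
-- (lines[0]) and ragged grids with a row shorter than row 0 (lines[y][x]).
def Pre_lines_diag_up (lines : List String) : Prop :=
  lines ≠ [] ∧ ∀ s ∈ lines, (lines.headD "").length ≤ s.length
instance (lines : List String) : Decidable (Pre_lines_diag_up lines) := by unfold Pre_lines_diag_up; infer_instance
def pvWitness_lines_diag_up : List String := (["abc", "def"])

def Spec_lines_diag_up (lines : List String) (out : List String) : Prop := out = lines_diag_up_alt lines
instance (lines : List String) (out : List String) : Decidable (Spec_lines_diag_up lines out) := by unfold Spec_lines_diag_up; infer_instance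

-- ===== CLAIM (what is proved, stated in full; the proofs are below) =====
def Claim_equal_lines_diag_up : Prop := ∀ (lines : List String), Dom_lines_diag_up lines → Pre_lines_diag_up lines → Spec_lines_diag_up lines (lines_diag_up lines)

-- ===== LEMMAS AND PROOFS =====

-- the characters a diagonal d picks up among rows b, b-1, …, 0, in that order
def pvDiagSpec (g : List (List Char)) (X d b : Int) : List Char :=
  (PySem.List.pyRange b (-1) (-1)).flatMap
    (fun y => if y ≤ d ∧ d < y + X then [PySem.List.pyGetD (PySem.List.pyGetD g y []) (d - y) ' '] else [])

theorem pvSkipA_spec (Y x y : Int) :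
    pvSkipA Y x y = if Y ≤ y then (x + (y - Y + 1), Y - 1) else (x, y) := by
  by_cases h : Y ≤ y
  · rw [pvSkipA, dif_pos h, pvSkipA_spec]
    by_cases h2 : Y ≤ y - 1
    · rw [if_pos h2, if_pos h]
      refine Prod.ext ?_ rfl
      simp; omega
    · rw [if_neg h2, if_pos h]
      refine Prod.ext ?_ ?_ <;> simp <;> omega
  · rw [pvSkipA, dif_neg h, if_neg h]
termination_by (y - Y + 1).toNat
decreasing_by omega

theorem pvDiagSpec_eq_collect (g : List (List Char)) (X d b : Int)
    (hd : 0 ≤ d) : pvDiagSpec g X d b = pvCollectA g X (d - min b d) (min b d) := by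
  by_cases hb : b ≤ -1
  · rw [pvDiagSpec, PySem.List.pyRange_neg_one_eq_nil hb, List.flatMap_nil, pvCollectA]
    rw [dif_neg (by omega)]
  · rw [pvDiagSpec, PySem.List.pyRange_neg_one_cons (by omega : (-1:Int) < b),
      List.flatMap_cons, ← pvDiagSpec]
    by_cases hbd : b ≤ d
    · have hmin : min b d = b := by omega
      rw [hmin]
      by_cases hx : d < b + X
      · rw [if_pos ⟨hbd, hx⟩, pvDiagSpec_eq_collect g X d (b-1) hd]
        have hmin2 : min (b-1) d = b - 1 := by omega
        rw [hmin2]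
        conv_rhs => rw [pvCollectA]
        rw [dif_pos ⟨by omega, by omega⟩]
        simp only [List.singleton_append, List.cons_inj_right]
        congr 1
        omega
      · rw [if_neg (by omega), pvDiagSpec_eq_collect g X d (b-1) hd]
        have hmin2 : min (b-1) d = b - 1 := by omega
        rw [hmin2]
        rw [show pvCollectA g X (d - (b-1)) (b-1) = [] from by
          rw [pvCollectA]; exact dif_neg (by omega)]
        rw [show pvCollectA g X (d - b) b = [] from by
          rw [pvCollectA]; exact dif_neg (by omega)]
        simp
    · have hmin : min b d = d := by omega
      rw [hmin, if_neg (by omega), pvDiagSpec_eq_collect g X d (b-1) hd]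
      have hmin2 : min (b-1) d = d := by omega
      rw [hmin2]
      simp
termination_by (b + 1).toNat
decreasing_by all_goals omega

-- inner fold over x ∈ range(a, X): effect on bucket d, plus length preservation
theorem pvAppendAt_length (bs : List (List Char)) (i : Int) (c : Char) :
    (pvAppendAt bs i c).length = bs.length := by
  unfold pvAppendAt; exact PySem.List.length_pySetD _ _ _

theorem pvAppendAt_getD (bs : List (List Char)) (i d : Int) (c : Char)
    (hi : 0 ≤ i) (hd : 0 ≤ d) (hir : i < (bs.length : Int)) :
    PySem.List.pyGetD (pvAppendAt bs i c) d []
      = if d = i then PySem.List.pyGetD bs d [] ++ [c] else PySem.List.pyGetD bs d [] := by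
  unfold pvAppendAt
  rw [PySem.List.pySetD_of_nonneg _ _ hi, PySem.List.pyGetD_of_nonneg _ _ hd,
      PySem.List.pyGetD_of_nonneg _ _ hi, PySem.List.pyGetD_of_nonneg _ _ hd,
      List.getD_eq_getElem?_getD, List.getElem?_set]
  by_cases h : d = i
  · subst h
    rw [if_pos rfl, if_pos (by omega)]
    simp [List.getD_eq_getElem?_getD]
  · rw [if_neg (by omega), if_neg h, List.getD_eq_getElem?_getD]

theorem pvInner_spec (g : List (List Char)) (X y : Int) (row : List Char) (a : Int)
    (bs : List (List Char)) (hy : 0 ≤ y) (ha : 0 ≤ a)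
    (hyX : y + X ≤ (bs.length : Int)) :
    (((PySem.List.pyRange a X 1).foldl
        (fun bs2 x => pvAppendAt bs2 (x + y) (PySem.List.pyGetD row x ' ')) bs).length = bs.length)
    ∧ ∀ d : Int, 0 ≤ d →
      PySem.List.pyGetD ((PySem.List.pyRange a X 1).foldl
          (fun bs2 x => pvAppendAt bs2 (x + y) (PySem.List.pyGetD row x ' ')) bs) d []
        = PySem.List.pyGetD bs d []
          ++ (if y + a ≤ d ∧ d < y + X then [PySem.List.pyGetD row (d - y) ' '] else []) := by
  by_cases hXa : X ≤ a
  · rw [PySem.List.pyRange_one_eq_nil hXa, List.foldl_nil]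
    refine ⟨rfl, fun d hd => ?_⟩
    rw [if_neg (by omega), List.append_nil]
  · rw [PySem.List.pyRange_one_cons (by omega : a < X)]
    simp only [List.foldl_cons]
    have hlen' : (pvAppendAt bs (a + y) (PySem.List.pyGetD row a ' ')).length = bs.length :=
      pvAppendAt_length _ _ _
    obtain ⟨ih1, ih2⟩ := pvInner_spec g X y row (a + 1)
      (pvAppendAt bs (a + y) (PySem.List.pyGetD row a ' ')) hy (by omega)
      (by rw [hlen']; exact hyX)
    refine ⟨by rw [ih1, hlen'], fun d hd => ?_⟩
    rw [ih2 d hd, pvAppendAt_getD bs (a + y) d _ (by omega) hd (by omega)]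
    by_cases hda : d = a + y
    · rw [if_pos hda, if_neg (by omega), if_pos ⟨by omega, by omega⟩, List.append_nil]
      have hxy : d - y = a := by omega
      rw [hxy]
    · rw [if_neg hda]
      by_cases hc : y + (a + 1) ≤ d ∧ d < y + X
      · rw [if_pos hc, if_pos ⟨by omega, hc.2⟩]
      · rw [if_neg hc, if_neg (by omega)]
termination_by (X - a).toNat
decreasing_by omega

-- outer fold over y ∈ range(b, -1, -1): buckets accumulate pvDiagSpec
theorem pvOuterB_spec (g : List (List Char)) (X : Int) (b : Int)
    (bs : List (List Char)) (hbl : b + X ≤ (bs.length : Int)) :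
    (((PySem.List.pyRange b (-1) (-1)).foldl
        (fun bs y =>
          let row := PySem.List.pyGetD g y []
          (PySem.List.pyRange 0 X 1).foldl
            (fun bs2 x => pvAppendAt bs2 (x + y) (PySem.List.pyGetD row x ' ')) bs) bs).length = bs.length)
    ∧ ∀ d : Int, 0 ≤ d →
      PySem.List.pyGetD (((PySem.List.pyRange b (-1) (-1)).foldl
        (fun bs y =>
          let row := PySem.List.pyGetD g y []
          (PySem.List.pyRange 0 X 1).foldl
            (fun bs2 x => pvAppendAt bs2 (x + y) (PySem.List.pyGetD row x ' ')) bs) bs)) d []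
        = PySem.List.pyGetD bs d [] ++ pvDiagSpec g X d b := by
  by_cases hb : b ≤ -1
  · rw [PySem.List.pyRange_neg_one_eq_nil hb, List.foldl_nil]
    refine ⟨rfl, fun d hd => ?_⟩
    rw [pvDiagSpec, PySem.List.pyRange_neg_one_eq_nil hb, List.flatMap_nil, List.append_nil]
  · rw [PySem.List.pyRange_neg_one_cons (by omega : (-1:Int) < b)]
    simp only [List.foldl_cons]
    obtain ⟨l1, e1⟩ := pvInner_spec g X b (PySem.List.pyGetD g b []) 0 bs (by omega) le_rfl (by omega)
    obtain ⟨ihl, ihe⟩ := pvOuterB_spec g X (b - 1)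
      ((PySem.List.pyRange 0 X 1).foldl
        (fun bs2 x => pvAppendAt bs2 (x + b) (PySem.List.pyGetD (PySem.List.pyGetD g b []) x ' ')) bs)
      (by rw [l1]; omega)
    refine ⟨by rw [ihl, l1], fun d hd => ?_⟩
    rw [ihe d hd, e1 d hd]
    conv_rhs => rw [pvDiagSpec, PySem.List.pyRange_neg_one_cons (show (-1:Int) < b by omega),
      List.flatMap_cons, ← pvDiagSpec]
    rw [List.append_assoc]
    simp only [add_zero]
termination_by (b + 1).toNat
decreasing_by omega

theorem pvOuterA_spec (g : List (List Char)) (X Y a : Int)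
    (hX : 0 < X) (hY : 0 < Y) (ha : 0 ≤ a) (han : a ≤ X + Y - 1) :
    pvOuterA g X Y (PySem.List.pyRange a (X + Y) 1)
      = (PySem.List.pyRange a (X + Y - 1) 1).map
          (fun d => String.ofList (pvDiagSpec g X d (Y - 1))) := by
  rw [PySem.List.pyRange_one_cons (show a < X + Y by omega)]
  simp only [pvOuterA, pvSkipA_spec]
  by_cases hY2 : Y ≤ a
  · rw [if_pos hY2]
    by_cases hend : X + Y - 1 ≤ a
    · rw [if_pos (show X ≤ ((0:Int) + (a - Y + 1), Y - 1).1 by simp; omega)]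
      rw [PySem.List.pyRange_one_eq_nil (by omega : X + Y - 1 ≤ a), List.map_nil]
    · rw [if_neg (show ¬ X ≤ ((0:Int) + (a - Y + 1), Y - 1).1 by simp; omega)]
      rw [pvOuterA_spec g X Y (a + 1) hX hY (by omega) (by omega)]
      rw [PySem.List.pyRange_one_cons (by omega : a < X + Y - 1), List.map_cons]
      congr 2
      rw [pvDiagSpec_eq_collect g X a (Y - 1) (by omega)]
      have h1 : min (Y - 1) a = Y - 1 := by omega
      rw [h1]
      congr 1
      · simp; omega
  · rw [if_neg hY2]
    rw [if_neg (show ¬ X ≤ ((0:Int), a).1 by simp; omega)]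
    rw [pvOuterA_spec g X Y (a + 1) hX hY (by omega) (by omega)]
    rw [PySem.List.pyRange_one_cons (by omega : a < X + Y - 1), List.map_cons]
    congr 2
    rw [pvDiagSpec_eq_collect g X a (Y - 1) (by omega)]
    have h1 : min (Y - 1) a = a := by omega
    rw [h1]
    congr 1
    · simp
termination_by (X + Y - 1 - a).toNat
decreasing_by all_goals omega

-- ===== VERDICT (by name: the statement is the Claim_ definition above) =====
theorem pvGetDExt (xs ys : List (List Char)) (hl : xs.length = ys.length)
    (h : ∀ k : Nat, k < xs.length → xs.getD k [] = ys.getD k []) : xs = ys := by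
  apply List.ext_getElem hl
  intro k h1 h2
  have := h k h1
  rwa [List.getD_eq_getElem _ _ h1, List.getD_eq_getElem _ _ h2] at this

theorem lines_diag_up_spec : Claim_equal_lines_diag_up := by
  intro lines _hdom hpre
  unfold Spec_lines_diag_up
  obtain ⟨hne, _hrows⟩ := hpre
  have hY : 0 < lines.length := List.length_pos_iff.mpr hne
  simp only [lines_diag_up, lines_diag_up_alt]
  set g := lines.map String.toList with hg
  set X : Int := ((PySem.List.pyGetD g 0 []).length : Int) with hXdef
  set Y : Int := ((lines.length : Nat) : Int) with hYdef
  have hY' : 0 < Y := by omega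
  by_cases hX0 : X = 0
  · rw [if_pos hX0]
    rw [PySem.List.pyRange_one_cons (show (0:Int) < X + Y by omega)]
    simp only [pvOuterA, pvSkipA_spec]
    have h1 : ¬ (Y ≤ (0:Int)) := by omega
    rw [if_neg h1, if_pos (show X ≤ ((0:Int), (0:Int)).1 by simp [hX0])]
  · rw [if_neg hX0]
    have hX : 0 < X := by omega
    rw [pvOuterA_spec g X Y 0 hX hY' le_rfl (by omega)]
    obtain ⟨bl, be⟩ := pvOuterB_spec g X (Y - 1) (List.replicate (X + Y - 1).toNat [])
      (by rw [List.length_replicate]; omega)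
    set bks := (List.foldl (fun bs y =>
        let row := PySem.List.pyGetD g y []
        List.foldl (fun bs2 x => pvAppendAt bs2 (x + y) (PySem.List.pyGetD row x ' ')) bs
          (PySem.List.pyRange 0 X 1))
      (List.replicate (X + Y - 1).toNat []) (PySem.List.pyRange (Y - 1) (-1) (-1))) with hbks
    rw [List.length_replicate] at bl
    have hb2 : bks = (PySem.List.pyRange 0 (X + Y - 1) 1).map (fun d => pvDiagSpec g X d (Y - 1)) := by
      apply pvGetDExt
      · rw [bl, List.length_map, PySem.List.length_pyRange_one]
        omega
      · intro k hk
        rw [bl] at hk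
        have hkd := be (k : Int) (by omega)
        rw [PySem.List.pyGetD_natCast, PySem.List.pyGetD_natCast] at hkd
        have hrep : (List.replicate (X + Y - 1).toNat ([] : List Char)).getD k [] = [] := by
          simp [List.getD_eq_getElem?_getD]
        rw [hrep, List.nil_append] at hkd
        rw [hkd, List.getD_eq_getElem _ _ (by rw [List.length_map, PySem.List.length_pyRange_one]; omega),
          List.getElem_map, PySem.List.getElem_pyRange_one, zero_add]
    rw [hb2, List.map_map]
    rfl
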